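-- pv_equiv track=rewrite | github.com/981377660LMT/algorithm-study | 22_专题/字典序列删除/G -字典序最小的排列.py | minimumPermutation
-- ===== SOURCE A (Python) =====
-- from typing import List
-- from collections import Counter
--
-- def minimumPermutation(nums: List[int], m: int) -> List[int]:
--     remain = Counter(nums)
--     visited = set()
--     stack = []
--     for num in nums:
--         remain[num] -= 1
--         if num in visited:
--             continue
--         while stack and stack[-1] > num and remain[stack[-1]] > 0:
--             visited.remove(stack.pop())
--         stack.append(num)
--         visited.add(num)
--     return stack[:m]
-- ===== SOURCE B (Python) =====
-- from typing import List
--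
-- def minimumPermutation(nums: List[int], m: int) -> List[int]:
--     # Repeated windowed min-scan: each round, the window may extend up to the
--     # first position whose value never reappears later; pick the smallest value
--     # in that window, emit it, and restart on the remainder with that value removed.
--     res = []
--     rest = list(nums)
--     while rest:
--         limit = 0
--         for limit, v in enumerate(rest):
--             if v not in rest[limit + 1:]:
--                 break
--         c = min(rest[: limit + 1])
--         j = rest.index(c)
--         res.append(c)
--         rest = [v for v in rest[j + 1:] if v != c]
--     return res[:m]
-- ===== Notes on version B (the rewrite author's own statement) =====
-- stated objective: alternative
-- what changed: Replaces the one-pass monotonic pop-stack with Counter/visited bookkeeping by repeated windowed min-scans: each round compute the window up to the first value that never reappears, take its minimum, and restart on the filtered remainder.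
import Mathlib
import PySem

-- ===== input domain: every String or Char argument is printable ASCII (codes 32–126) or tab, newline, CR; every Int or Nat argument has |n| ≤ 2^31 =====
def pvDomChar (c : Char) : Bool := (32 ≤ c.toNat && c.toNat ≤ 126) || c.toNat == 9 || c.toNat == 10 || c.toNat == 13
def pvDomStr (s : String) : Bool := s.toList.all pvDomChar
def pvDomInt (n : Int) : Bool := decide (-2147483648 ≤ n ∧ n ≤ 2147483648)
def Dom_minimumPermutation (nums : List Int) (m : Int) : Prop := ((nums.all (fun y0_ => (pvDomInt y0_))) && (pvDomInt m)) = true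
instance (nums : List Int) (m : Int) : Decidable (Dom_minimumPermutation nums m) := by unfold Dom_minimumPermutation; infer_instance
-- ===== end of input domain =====

-- B replaces A's one-pass monotonic pop-stack by repeated windowed min-scans (objective: alternative).

-- ===== PORT A =====
-- the while-loop 'while stack and stack[-1] > num and remain[stack[-1]] > 0: visited.remove(stack.pop())'
-- (the popped element was pushed together with its visited entry, so it is always in visited: set.remove = discard here)
def popA (num : Int) (remain : PySem.Dict Int Int) (stack : List Int) (visited : PySem.Set Int) :
    List Int × PySem.Set Int :=
  if h : stack ≠ [] ∧ num < PySem.List.pyGetD stack (-1) 0 ∧ 0 < remain.getD (PySem.List.pyGetD stack (-1) 0) 0 then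
    popA num remain stack.dropLast (PySem.Set.discard visited (PySem.List.pyGetD stack (-1) 0))
  else (stack, visited)
termination_by stack.length
decreasing_by
  have h0 : stack.length ≠ 0 := fun h0 => h.1 (List.eq_nil_of_length_eq_zero h0)
  have h1 : stack.dropLast.length = stack.length - 1 := by simp
  omega

-- the 'for num in nums' loop, state (remain, visited, stack)
def aGo (rest : List Int) (remain : PySem.Dict Int Int) (visited : PySem.Set Int) (stack : List Int) :
    List Int :=
  match rest with
  | [] => stack
  | num :: rest =>
    let remain := remain.modify num 0 (· - 1)          -- remain[num] -= 1 (Counter: missing key counts 0)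
    if PySem.Set.contains visited num then aGo rest remain visited stack
    else
      let sv := popA num remain stack visited
      aGo rest remain (PySem.Set.add sv.2 num) (sv.1 ++ [num])

def minimumPermutation (nums : List Int) (m : Int) : List Int :=
  PySem.List.slice (aGo nums (PySem.Dict.counter nums) PySem.Set.empty []) none (some m)

-- ===== PORT B =====
-- 'for limit, v in enumerate(rest): if v not in rest[limit+1:]: break' — first index whose value never reappears
def findStop : List Int → Nat
  | [] => 0
  | v :: rs => if v ∈ rs then findStop rs + 1 else 0

theorem filter_drop_lt (rest : List Int) (f : Int → Bool) (k : Nat) (h : ¬ rest.isEmpty) :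
    (List.filter f (rest.drop (k + 1))).length < rest.length := by
  have h1 : (List.filter f (rest.drop (k + 1))).length ≤ (rest.drop (k + 1)).length :=
    List.length_filter_le _ _
  have h2 : (rest.drop (k + 1)).length = rest.length - (k + 1) := List.length_drop
  have h3 : rest.length ≠ 0 := by simpa [List.isEmpty_iff, ← List.length_eq_zero_iff] using h
  omega

-- the 'while rest' loop of Source B, producing res front to back
def altGo (rest : List Int) : List Int :=
  if h : rest.isEmpty then []
  else
    let limit := findStop rest
    -- min(rest[:limit+1]) / rest.index(c): the window is nonempty and c ∈ rest, so Python never raises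
    let c := (PySem.List.min? (rest.take (limit + 1)) (fun x => x)).getD 0
    let j := (PySem.List.index? rest c).getD 0
    c :: altGo ((rest.drop (j + 1)).filter (fun v => v ≠ c))
termination_by rest.length
decreasing_by exact filter_drop_lt rest _ _ h

def minimumPermutation_alt (nums : List Int) (m : Int) : List Int :=
  PySem.List.slice (altGo nums) none (some m)

-- ===== PRECONDITION & SPEC =====
def Spec_minimumPermutation (nums : List Int) (m : Int) (out : List Int) : Prop := out = minimumPermutation_alt nums m
instance (nums : List Int) (m : Int) (out : List Int) : Decidable (Spec_minimumPermutation nums m out) := by unfold Spec_minimumPermutation; infer_instance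

-- ===== CLAIM (what is proved, stated in full; the proofs are below) =====
def Claim_equal_minimumPermutation : Prop := ∀ (nums : List Int) (m : Int), Dom_minimumPermutation nums m → Spec_minimumPermutation nums m (minimumPermutation nums m)

-- ===== LEMMAS AND PROOFS =====

-- Abstract model of A's loop: stack kept top-first, Counter/visited replaced by
-- membership in the not-yet-consumed suffix / in the stack itself.
def popW (p : Int → Prop) [DecidablePred p] : List Int → List Int
  | [] => []
  | t :: s => if p t then popW p s else t :: s

def mGo : List Int → List Int → List Int
  | stack, [] => stack
  | stack, num :: rest =>
    if num ∈ stack then mGo stack rest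
    else mGo (num :: popW (fun t => num < t ∧ t ∈ rest) stack) rest

theorem popW_sublist (p : Int → Prop) [DecidablePred p] (s : List Int) : (popW p s).Sublist s := by
  induction s with
  | nil => simp [popW]
  | cons t s ih =>
    simp only [popW]
    split
    · exact ih.cons t
    · exact List.Sublist.refl _

theorem popW_nil_of_forall (p : Int → Prop) [DecidablePred p] (s : List Int)
    (h : ∀ t ∈ s, p t) : popW p s = [] := by
  induction s with
  | nil => rfl
  | cons t s ih =>
    simp only [popW, if_pos (h t (by simp))]
    exact ih (fun x hx => h x (by simp [hx]))

theorem popW_ne_nil (p : Int → Prop) [DecidablePred p] (s : List Int) (x : Int)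
    (hx : x ∈ s) (hp : ¬ p x) : popW p s ≠ [] := by
  induction s with
  | nil => simp at hx
  | cons t s ih =>
    simp only [popW]
    split
    · rename_i hpt
      rcases List.mem_cons.mp hx with rfl | hx'
      · exact absurd hpt hp
      · exact ih hx'
    · simp

theorem mem_popW (p : Int → Prop) [DecidablePred p] (s : List Int) (x : Int)
    (hx : x ∈ s) (hp : ¬ p x) : x ∈ popW p s := by
  induction s with
  | nil => simp at hx
  | cons t s ih =>
    simp only [popW]
    split
    · rename_i hpt
      rcases List.mem_cons.mp hx with rfl | hx'
      · exact absurd hpt hp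
      · exact ih hx'
    · exact hx

theorem popW_congr (p q : Int → Prop) [DecidablePred p] [DecidablePred q] (s : List Int)
    (h : ∀ t ∈ s, p t ↔ q t) : popW p s = popW q s := by
  induction s with
  | nil => rfl
  | cons t s ih =>
    simp only [popW]
    by_cases hpt : p t
    · rw [if_pos hpt, if_pos ((h t (by simp)).mp hpt)]
      exact ih (fun x hx => h x (by simp [hx]))
    · rw [if_neg hpt, if_neg (fun hq => hpt ((h t (by simp)).mpr hq))]

theorem popW_append_singleton (p : Int → Prop) [DecidablePred p] (s : List Int) (c : Int)
    (h : ¬ p c ∨ popW p s ≠ []) : popW p (s ++ [c]) = popW p s ++ [c] := by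
  induction s with
  | nil =>
    rcases h with h | h
    · simp [popW, h]
    · simp [popW] at h
  | cons t s ih =>
    simp only [List.cons_append, popW]
    split
    · rename_i hpt
      rcases h with h | h
      · exact ih (Or.inl h)
      · simp only [popW, if_pos hpt] at h
        exact ih (Or.inr h)
    · simp

-- ---- bridge: the literal port equals the model ----

theorem popA_spec (num : Int) (rest : List Int) (remain : PySem.Dict Int Int)
    (stack : List Int) (visited : PySem.Set Int)
    (hrem : ∀ x, remain.getD x 0 = (rest.count x : Int))
    (hvis : ∀ x, x ∈ visited ↔ x ∈ stack)
    (hnd : stack.Nodup) :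
    (popA num remain stack visited).1 =
      (popW (fun t => num < t ∧ t ∈ rest) stack.reverse).reverse ∧
    (∀ x, x ∈ (popA num remain stack visited).2 ↔
      x ∈ (popW (fun t => num < t ∧ t ∈ rest) stack.reverse).reverse) := by
  induction stack using List.reverseRecOn generalizing visited with
  | nil =>
    rw [popA]
    simp only [ne_eq, not_true_eq_false, false_and, dite_false]
    simpa [popW] using hvis
  | append_singleton ys t ih =>
    have hget : PySem.List.pyGetD (ys ++ [t]) (-1) (0 : Int) = t :=
      PySem.List.pyGetD_neg_one_append_singleton ys t 0
    have hcnt : (0 < remain.getD t 0) ↔ t ∈ rest := by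
      rw [hrem t]
      exact_mod_cast List.count_pos_iff
    have htys : t ∉ ys := by
      have h := List.nodup_append.mp hnd
      exact fun hm => h.2.2 t hm t (by simp) rfl
    rw [popA]
    split
    · rename_i hg
      rw [hget] at hg
      have hpt : num < t ∧ t ∈ rest := ⟨hg.2.1, hcnt.mp hg.2.2⟩
      have ih' := ih (PySem.Set.discard visited t)
        (fun x => by
          rw [PySem.Set.mem_discard, hvis x]
          constructor
          · rintro ⟨hx, hne⟩
            rcases List.mem_append.mp hx with h | h
            · exact h
            · simp at h; exact absurd h hne
          · intro hx
            exact ⟨List.mem_append.mpr (Or.inl hx), fun he => htys (he ▸ hx)⟩)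
        ((List.nodup_append.mp hnd).1)
      have hpop : popW (fun t => num < t ∧ t ∈ rest) ((ys ++ [t]).reverse) =
          popW (fun t => num < t ∧ t ∈ rest) ys.reverse := by
        simp [popW, hpt]
      simp only [hget, List.dropLast_concat, hpop]
      exact ih'
    · rename_i hg
      rw [hget] at hg
      have hg' : ¬ (num < t ∧ t ∈ rest) :=
        fun h => hg ⟨by simp, h.1, hcnt.mpr h.2⟩
      have hpop : popW (fun t => num < t ∧ t ∈ rest) ((ys ++ [t]).reverse) = t :: ys.reverse := by
        simp [popW, hg']
      rw [hpop]
      constructor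
      · simp
      · intro x; rw [hvis x]; simp

theorem aGo_eq_mGo (rest : List Int) (remain : PySem.Dict Int Int) (visited : PySem.Set Int)
    (stack : List Int)
    (hrem : ∀ x, remain.getD x 0 = (rest.count x : Int))
    (hvis : ∀ x, x ∈ visited ↔ x ∈ stack)
    (hnd : stack.Nodup) :
    aGo rest remain visited stack = (mGo stack.reverse rest).reverse := by
  induction rest generalizing remain visited stack with
  | nil => simp [aGo, mGo]
  | cons num rest' ih =>
    have hrem' : ∀ x, (remain.modify num 0 (· - 1)).getD x 0 = (rest'.count x : Int) := by
      intro x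
      rw [PySem.Dict.getD_modify]
      by_cases hx : x = num
      · subst hx
        rw [if_pos rfl, hrem x]
        simp only [List.count_cons, beq_self_eq_true, if_true]
        push_cast
        ring
      · rw [if_neg hx, hrem x]
        simp only [List.count_cons]
        have hb : ¬ num = x := fun h => hx h.symm
        simp [hb]
    rw [aGo, mGo]
    by_cases hmem : num ∈ stack
    · rw [if_pos (by simpa [PySem.Set.contains_iff, hvis] using hmem),
        if_pos (by simpa using hmem)]
      exact ih _ _ _ hrem' hvis hnd
    · rw [if_neg (by simpa [PySem.Set.contains_iff, hvis] using hmem),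
        if_neg (by simpa using hmem)]
      obtain ⟨h1, h2⟩ := popA_spec num rest' (remain.modify num 0 (· - 1)) stack visited
        hrem' hvis hnd
      have hsub : (popW (fun t => num < t ∧ t ∈ rest') stack.reverse).Sublist stack.reverse :=
        popW_sublist _ _
      have hnum_not : num ∉ (popW (fun t => num < t ∧ t ∈ rest') stack.reverse).reverse := by
        intro hmm
        exact hmem (by simpa using hsub.mem (by simpa using hmm))
      have hnd' : ((popA num (remain.modify num 0 (· - 1)) stack visited).1 ++ [num]).Nodup := by
        rw [h1]
        refine List.Nodup.append ?_ (by simp) ?_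
        · exact List.nodup_reverse.mpr (hsub.nodup (by simpa using hnd))
        · intro a ha hb
          simp only [List.mem_singleton] at hb
          subst hb
          exact hnum_not ha
      have ihx := ih (remain.modify num 0 (· - 1))
        (PySem.Set.add (popA num (remain.modify num 0 (· - 1)) stack visited).2 num)
        ((popA num (remain.modify num 0 (· - 1)) stack visited).1 ++ [num])
        hrem'
        (fun x => by
          rw [PySem.Set.mem_add, h2 x, h1]
          simp)
        hnd'
      rw [ihx, h1]
      simp

-- ---- phase 1: processing the window up to c's first occurrence empties the stack ----

theorem mGo_phase1 (c : Int) (suf : List Int) : ∀ (pre stack : List Int),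
    (∀ x ∈ stack, c < x ∧ x ∈ suf) →
    (∀ x ∈ pre, c < x ∧ x ∈ suf) →
    mGo stack (pre ++ c :: suf) = mGo [c] suf := by
  intro pre
  induction pre with
  | nil =>
    intro stack hstack _
    rw [List.nil_append, mGo]
    rw [if_neg (fun hc => lt_irrefl c (hstack c hc).1)]
    rw [popW_nil_of_forall _ stack hstack]
  | cons p pre' ih =>
    intro stack hstack hpre
    rw [List.cons_append, mGo]
    split
    · exact ih stack hstack (fun x hx => hpre x (by simp [hx]))
    · apply ih
      · intro x hx
        rcases List.mem_cons.mp hx with rfl | hx'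
        · exact hpre x (by simp)
        · exact hstack x ((popW_sublist _ _).mem hx')
      · exact fun x hx => hpre x (by simp [hx])

-- ---- phase 2: c stays at the bottom; the run above it is the run on the c-filtered input ----

def Safe (c : Int) (S rest : List Int) : Prop :=
  (∃ x ∈ S, x ∉ rest) ∨
  ∃ mid post, rest = mid ++ post ∧ (∀ v ∈ mid, c ≤ v) ∧
    (c ∉ post ∨ ∃ w, mid.getLast? = some w ∧ w ∉ post)

theorem mGo_couple (c : Int) (rest : List Int) : ∀ S : List Int, c ∉ S → Safe c S rest →
    mGo (S ++ [c]) rest = mGo S (rest.filter (fun v => v ≠ c)) ++ [c] := by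
  induction rest with
  | nil => intro S _ _; simp [mGo]
  | cons num rest' ih =>
    intro S hcS hsafe
    by_cases hnc : num = c
    · subst hnc
      rw [mGo, if_pos (by simp)]
      have hfil : (num :: rest').filter (fun v => v ≠ num) = rest'.filter (fun v => v ≠ num) := by
        simp
      rw [hfil]
      apply ih S hcS
      rcases hsafe with ⟨x, hxS, hx⟩ | ⟨mid, post, heq, hmid, hdisj⟩
      · exact Or.inl ⟨x, hxS, fun h => hx (by simp [h])⟩
      · cases mid with
        | nil =>
          rw [List.nil_append] at heq; subst heq
          rcases hdisj with hcp | ⟨w, hw, _⟩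
          · exact absurd (by simp) hcp
          · simp at hw
        | cons m mid' =>
          rw [List.cons_append] at heq
          injection heq with h1 heq'
          subst h1
          rcases hdisj with hcp | ⟨w, hw, hwp⟩
          · exact Or.inr ⟨mid', post, heq', fun v hv => hmid v (by simp [hv]), Or.inl hcp⟩
          · cases mid' with
            | nil =>
              simp only [List.getLast?_singleton, Option.some.injEq] at hw
              subst hw
              simp only [List.nil_append] at heq'
              exact Or.inr ⟨[], post, by simpa using heq', by simp, Or.inl hwp⟩
            | cons m2 mid'' =>
              exact Or.inr ⟨m2 :: mid'', post, heq', fun v hv => hmid v (by simp [hv]),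
                Or.inr ⟨w, by rw [← List.getLast?_cons_cons]; exact hw, hwp⟩⟩
    · by_cases hmemS : num ∈ S
      · rw [mGo, if_pos (by simp [hmemS])]
        have hfil : (num :: rest').filter (fun v => v ≠ c) = num :: rest'.filter (fun v => v ≠ c) := by
          simp [hnc]
        rw [hfil, mGo, if_pos hmemS]
        apply ih S hcS
        rcases hsafe with ⟨x, hxS, hx⟩ | ⟨mid, post, heq, hmid, hdisj⟩
        · exact Or.inl ⟨x, hxS, fun h => hx (by simp [h])⟩
        · cases mid with
          | nil =>
            rw [List.nil_append] at heq; subst heq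
            rcases hdisj with hcp | ⟨w, hw, _⟩
            · exact Or.inr ⟨[], rest', by simp, by simp, Or.inl (fun h => hcp (by simp [h]))⟩
            · simp at hw
          | cons m mid' =>
            rw [List.cons_append] at heq
            injection heq with h1 heq'
            subst h1
            rcases hdisj with hcp | ⟨w, hw, hwp⟩
            · exact Or.inr ⟨mid', post, heq', fun v hv => hmid v (by simp [hv]), Or.inl hcp⟩
            · cases mid' with
              | nil =>
                simp only [List.getLast?_singleton, Option.some.injEq] at hw
                subst hw
                simp only [List.nil_append] at heq'
                exact Or.inl ⟨num, hmemS, by rw [heq']; exact hwp⟩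
              | cons m2 mid'' =>
                exact Or.inr ⟨m2 :: mid'', post, heq', fun v hv => hmid v (by simp [hv]),
                  Or.inr ⟨w, by rw [← List.getLast?_cons_cons]; exact hw, hwp⟩⟩
      · -- num is pushed on both sides; c is never popped
        have hpc : ¬ (num < c ∧ c ∈ rest') ∨ popW (fun t => num < t ∧ t ∈ rest') S ≠ [] := by
          rcases hsafe with ⟨x, hxS, hx⟩ | ⟨mid, post, heq, hmid, hdisj⟩
          · refine Or.inr (popW_ne_nil _ S x hxS ?_)
            exact fun h => hx (by simp [h.2])
          · cases mid with
            | nil =>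
              rw [List.nil_append] at heq; subst heq
              rcases hdisj with hcp | ⟨w, hw, _⟩
              · exact Or.inl (fun h => hcp (by simp [h.2]))
              · simp at hw
            | cons m mid' =>
              have hcm : c ≤ m := hmid m (by simp)
              have hm : num = m := by
                rw [List.cons_append] at heq
                injection heq
              exact Or.inl (fun h => absurd h.1 (by omega))
        rw [mGo, if_neg (by simp [hmemS, hnc])]
        have hfil : (num :: rest').filter (fun v => v ≠ c) = num :: rest'.filter (fun v => v ≠ c) := by
          simp [hnc]
        rw [hfil, mGo, if_neg hmemS]
        have hcongr : popW (fun t => num < t ∧ t ∈ rest') S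
            = popW (fun t => num < t ∧ t ∈ rest'.filter (fun v => v ≠ c)) S :=
          popW_congr _ _ S (fun t ht => by
            have htc : t ≠ c := fun h => hcS (h ▸ ht)
            simp [List.mem_filter, htc])
        rw [popW_append_singleton _ S c hpc, hcongr,
          show num :: (popW (fun t => num < t ∧ t ∈ rest'.filter (fun v => v ≠ c)) S ++ [c])
            = (num :: popW (fun t => num < t ∧ t ∈ rest'.filter (fun v => v ≠ c)) S) ++ [c] from rfl]
        apply ih
        · intro hc
          rcases List.mem_cons.mp hc with h | h
          · exact hnc h.symm
          · exact hcS ((popW_sublist _ _).mem h)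
        · rcases hsafe with ⟨x, hxS, hx⟩ | ⟨mid, post, heq, hmid, hdisj⟩
          · have hxr : x ∉ rest' := fun h => hx (by simp [h])
            refine Or.inl ⟨x, List.mem_cons.mpr (Or.inr ?_), hxr⟩
            apply mem_popW _ S x hxS
            exact fun hp => hxr (List.mem_filter.mp hp.2).1
          · cases mid with
            | nil =>
              rw [List.nil_append] at heq; subst heq
              rcases hdisj with hcp | ⟨w, hw, _⟩
              · exact Or.inr ⟨[], rest', by simp, by simp, Or.inl (fun h => hcp (by simp [h]))⟩
              · simp at hw
            | cons m mid' =>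
              rw [List.cons_append] at heq
              injection heq with h1 heq'
              subst h1
              rcases hdisj with hcp | ⟨w, hw, hwp⟩
              · exact Or.inr ⟨mid', post, heq', fun v hv => hmid v (by simp [hv]), Or.inl hcp⟩
              · cases mid' with
                | nil =>
                  simp only [List.getLast?_singleton, Option.some.injEq] at hw
                  subst hw
                  simp only [List.nil_append] at heq'
                  exact Or.inl ⟨num, by simp, by rw [heq']; exact hwp⟩
                | cons m2 mid'' =>
                  exact Or.inr ⟨m2 :: mid'', post, heq', fun v hv => hmid v (by simp [hv]),
                    Or.inr ⟨w, by rw [← List.getLast?_cons_cons]; exact hw, hwp⟩⟩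

-- ---- facts about B's computed window / minimum / index ----

theorem findStop_lt (rest : List Int) (h : rest ≠ []) : findStop rest < rest.length := by
  induction rest with
  | nil => simp at h
  | cons v rs ih =>
    simp only [findStop]
    split
    · rename_i hv
      have : rs ≠ [] := fun h0 => by simp [h0] at hv
      simpa using Nat.succ_lt_succ (ih this)
    · simp

theorem findStop_head_not_reappear : ∀ (rest : List Int), rest ≠ [] →
    ∃ w, rest.drop (findStop rest) = w :: rest.drop (findStop rest + 1) ∧
      w ∉ rest.drop (findStop rest + 1) := by
  intro rest h
  induction rest with
  | nil => exact absurd rfl h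
  | cons v rs ih =>
    by_cases hv : v ∈ rs
    · have hne : rs ≠ [] := fun h0 => by simp [h0] at hv
      obtain ⟨w, hw1, hw2⟩ := ih hne
      refine ⟨w, ?_, ?_⟩
      · simpa [findStop, hv] using hw1
      · simpa [findStop, hv] using hw2
    · exact ⟨v, by simp [findStop, hv], by simp [findStop, hv]⟩

theorem mem_drop_findStop (rest : List Int) (v : Int) (hv : v ∈ rest) :
    v ∈ rest.drop (findStop rest) := by
  induction rest with
  | nil => simp at hv
  | cons x rs ih =>
    simp only [findStop]
    split
    · rename_i hx
      rcases List.mem_cons.mp hv with rfl | hv'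
      · simpa using ih hx
      · simpa using ih hv'
    · simpa using hv

-- ---- main induction: A's model run equals B's recursion ----

theorem mGo_eq_altGo : ∀ (n : Nat) (rest : List Int), rest.length ≤ n →
    (mGo [] rest).reverse = altGo rest := by
  intro n
  induction n with
  | zero =>
    intro rest h
    have h0 : rest = [] := List.length_eq_zero_iff.mp (Nat.le_zero.mp h)
    subst h0
    simp [mGo, altGo]
  | succ n ihn =>
    intro rest hlen
    by_cases hre : rest.isEmpty
    · have h0 : rest = [] := List.isEmpty_iff.mp hre
      subst h0
      simp [mGo, altGo]
    · have hne : rest ≠ [] := by simpa [List.isEmpty_iff] using hre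
      have hlim : findStop rest < rest.length := findStop_lt rest hne
      have hwne : rest.take (findStop rest + 1) ≠ [] := by
        intro h0
        have := congrArg List.length h0
        simp only [List.length_take, List.length_nil] at this
        omega
      obtain ⟨c, hc⟩ : ∃ c, PySem.List.min? (rest.take (findStop rest + 1)) (fun x => x) = some c := by
        cases h : PySem.List.min? (rest.take (findStop rest + 1)) (fun x => x) with
        | none => exact absurd ((PySem.List.min?_eq_none_iff _ _).mp h) hwne
        | some c => exact ⟨c, rfl⟩
      have hcmem : c ∈ rest.take (findStop rest + 1) := PySem.List.min?_mem hc
      have hcmin : ∀ y ∈ rest.take (findStop rest + 1), c ≤ y := PySem.List.min?_isMin hc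
      have hcrest : c ∈ rest := List.take_subset _ _ hcmem
      obtain ⟨j, hj⟩ : ∃ j, PySem.List.index? rest c = some j :=
        Option.isSome_iff_exists.mp (((PySem.List.index?_isSome_iff _ _).mpr hcrest))
      obtain ⟨pre, suf, heq, hlenpre, hcpre⟩ := (PySem.List.index?_eq_some_iff _ _ _).mp hj
      subst hlenpre
      have hjlim : pre.length ≤ findStop rest := by
        by_contra hgt
        rw [Nat.not_le] at hgt
        have htk : rest.take (findStop rest + 1) = pre.take (findStop rest + 1) := by
          obtain ⟨L, hL⟩ : ∃ L, L = findStop rest := ⟨_, rfl⟩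
          rw [← hL, heq]
          exact List.take_append_of_le_length (by omega)
        exact hcpre (List.take_subset _ _ (htk ▸ hcmem))
      have hdropj : rest.drop pre.length = c :: suf := by
        rw [heq]; exact List.drop_left
      have hdropj1 : rest.drop (pre.length + 1) = suf := by
        rw [heq, show pre ++ c :: suf = (pre ++ [c]) ++ suf by simp,
          show pre.length + 1 = (pre ++ [c]).length by simp]
        exact List.drop_left
      have hpre_eq : rest.take pre.length = pre := by
        rw [heq]; exact List.take_left
      have hsuflen : suf.length = rest.length - (pre.length + 1) := by
        rw [← hdropj1, List.length_drop]
      have hpre : ∀ x ∈ pre, c < x ∧ x ∈ suf := by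
        intro x hx
        have hxtake : x ∈ rest.take (findStop rest + 1) := by
          have h2 : rest.take pre.length = (rest.take (findStop rest + 1)).take pre.length := by
            rw [List.take_take]; congr 1; omega
          rw [← hpre_eq, h2] at hx
          exact List.take_subset _ _ hx
        have hcx : c ≤ x := hcmin x hxtake
        have hxc : x ≠ c := fun h => hcpre (h ▸ hx)
        refine ⟨lt_of_le_of_ne hcx (Ne.symm hxc), ?_⟩
        have hxrest : x ∈ rest := by
          rw [← hpre_eq] at hx
          exact List.take_subset _ _ hx
        have hxdrop : x ∈ rest.drop (findStop rest) := mem_drop_findStop rest x hxrest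
        rcases Nat.eq_or_lt_of_le hjlim with hEq | hLt
        · rw [← hEq, hdropj] at hxdrop
          rcases List.mem_cons.mp hxdrop with h | h
          · exact absurd h hxc
          · exact h
        · have hdd : rest.drop (findStop rest)
              = (rest.drop (pre.length + 1)).drop (findStop rest - (pre.length + 1)) := by
            rw [List.drop_drop]; congr 1; omega
          rw [hdd, hdropj1] at hxdrop
          exact List.drop_subset _ _ hxdrop
      obtain ⟨w, hwdecomp, hwnot⟩ := findStop_head_not_reappear rest hne
      have hsafe : Safe c [] suf := by
        rcases Nat.eq_or_lt_of_le hjlim with hEq | hLt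
        · right
          refine ⟨[], suf, by simp, by simp, Or.inl ?_⟩
          rw [← hEq, hdropj, hdropj1] at hwdecomp
          rw [← hEq, hdropj1] at hwnot
          injection hwdecomp with hcw _
          rw [hcw]; exact hwnot
        · right
          refine ⟨suf.take (findStop rest - (pre.length + 1) + 1),
            suf.drop (findStop rest - (pre.length + 1) + 1),
            (List.take_append_drop _ _).symm, ?_, Or.inr ⟨w, ?_, ?_⟩⟩
          · intro v hv
            apply hcmin
            have htd : suf.take (findStop rest - (pre.length + 1) + 1)
                = (rest.take (findStop rest + 1)).drop (pre.length + 1) := by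
              rw [← hdropj1, List.take_drop]
              congr 2
              omega
            rw [htd] at hv
            exact List.drop_subset _ _ hv
          · have hlast : (suf.take (findStop rest - (pre.length + 1) + 1)).getLast?
                = suf[findStop rest - (pre.length + 1)]? := by
              rw [List.getLast?_eq_getElem?, List.length_take]
              have hmin : min (findStop rest - (pre.length + 1) + 1) suf.length
                  = findStop rest - (pre.length + 1) + 1 := by omega
              rw [hmin, Nat.add_sub_cancel]
              exact List.getElem?_take_of_lt (by omega)
            have hsufk : suf[findStop rest - (pre.length + 1)]? = some w := by
              rw [← hdropj1, List.getElem?_drop,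
                show pre.length + 1 + (findStop rest - (pre.length + 1)) = findStop rest by omega]
              have h0 := congrArg (fun l => l[0]?) hwdecomp
              simpa [List.getElem?_drop] using h0
            rw [hlast, hsufk]
          · have hdd : suf.drop (findStop rest - (pre.length + 1) + 1)
                = rest.drop (findStop rest + 1) := by
              rw [← hdropj1, List.drop_drop]
              congr 1
              omega
            rw [hdd]
            exact hwnot
      have h1 : mGo [] rest = mGo [c] suf := by
        rw [heq]; exact mGo_phase1 c suf pre [] (by simp) hpre
      have h2 : mGo [c] suf = mGo [] (suf.filter (fun v => v ≠ c)) ++ [c] := by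
        simpa using mGo_couple c suf [] (by simp) hsafe
      have hrec : (mGo [] (suf.filter (fun v => v ≠ c))).reverse
          = altGo (suf.filter (fun v => v ≠ c)) := by
        apply ihn
        have := List.length_filter_le (fun v => decide (v ≠ c)) suf
        omega
      rw [h1, h2, List.reverse_append, hrec]
      conv_rhs => rw [altGo, dif_neg hre]
      simp only [hc, hj, Option.getD_some, hdropj1]
      simp

-- ===== VERDICT (by name: the statement is the Claim_ definition above) =====
theorem minimumPermutation_spec : Claim_equal_minimumPermutation := by
  intro nums m _
  show minimumPermutation nums m = minimumPermutation_alt nums m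
  unfold minimumPermutation minimumPermutation_alt
  rw [aGo_eq_mGo nums (PySem.Dict.counter nums) PySem.Set.empty []
      (fun x => by simp [PySem.Dict.getD_counter])
      (fun x => by simp [PySem.Set.empty])
      (by simp),
    List.reverse_nil, mGo_eq_altGo nums.length nums le_rfl]
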